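-- pv_equiv track=rewrite | github.com/KIST-delight-robotics/DrumRobot2 | phil_robot/pipeline/motion_resolver.py | _replace_relative_motion_sequence
-- ===== SOURCE A (Python) =====
-- def _replace_relative_motion_sequence(op_cmds, move_op_cmd):
--     updated_commands = []
--     replaced = False
--
--     for command in op_cmds:
--         if command.startswith("move:") and not replaced:
--             updated_commands.append(move_op_cmd)
--             replaced = True
--             continue
--         if command.startswith("move:"):
--             continue
--         if command.startswith(("look:", "gesture:")):
--             continue
--         updated_commands.append(command)
--
--     if not replaced:
--         wait_idx = next((idx for idx, command in enumerate(updated_commands) if command.startswith("wait:")), len(updated_commands))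
--         updated_commands.insert(wait_idx, move_op_cmd)
--
--     return updated_commands
-- ===== SOURCE B (Python) =====
-- def _replace_relative_motion_sequence(op_cmds, move_op_cmd):
--     def keep(c):
--         return not c.startswith(("move:", "look:", "gesture:"))
--
--     filtered = [c for c in op_cmds if keep(c)]
--     move_idx = next((i for i, c in enumerate(op_cmds) if c.startswith("move:")), None)
--     if move_idx is not None:
--         pos = sum(1 for c in op_cmds[:move_idx] if keep(c))
--     else:
--         pos = next((i for i, c in enumerate(filtered) if c.startswith("wait:")), len(filtered))
--     filtered.insert(pos, move_op_cmd)
--     return filtered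
-- ===== Notes on version B (the rewrite author's own statement) =====
-- stated objective: alternative
-- what changed: A's single stateful loop (replaced flag, skip/append decisions interleaved) is decomposed into a pure filter pass plus a separately computed insertion index (count of kept commands before the first move, or the first wait position when no move exists).
import Mathlib
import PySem

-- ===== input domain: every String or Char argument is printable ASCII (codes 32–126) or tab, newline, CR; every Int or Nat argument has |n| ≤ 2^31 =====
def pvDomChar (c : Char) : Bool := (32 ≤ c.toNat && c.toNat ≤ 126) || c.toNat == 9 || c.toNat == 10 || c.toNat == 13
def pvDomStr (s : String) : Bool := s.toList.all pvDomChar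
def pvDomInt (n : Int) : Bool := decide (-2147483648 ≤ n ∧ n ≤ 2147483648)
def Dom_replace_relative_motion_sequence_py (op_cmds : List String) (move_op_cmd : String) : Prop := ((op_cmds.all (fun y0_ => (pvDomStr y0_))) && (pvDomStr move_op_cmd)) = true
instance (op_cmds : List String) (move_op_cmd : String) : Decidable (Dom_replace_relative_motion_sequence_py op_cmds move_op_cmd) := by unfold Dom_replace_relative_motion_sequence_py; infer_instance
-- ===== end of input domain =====

-- B replaces A's single stateful loop by a pure filter pass plus a separately computed insertion index (alternative decomposition, same cost).

-- ===== PORT A =====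
-- the for-loop of A: state = (updated_commands, replaced)
def pvAloop (m : String) : List String → List String → Bool → List String × Bool
  | [], acc, replaced => (acc, replaced)
  | c :: rest, acc, replaced =>
    if PySem.Str.startswith c "move:" && !replaced then
      pvAloop m rest (acc ++ [m]) true
    else if PySem.Str.startswith c "move:" then
      pvAloop m rest acc replaced
    else if PySem.Str.startswith c "look:" || PySem.Str.startswith c "gesture:" then
      pvAloop m rest acc replaced
    else
      pvAloop m rest (acc ++ [c]) replaced

-- next((idx for idx, command in enumerate(u) if command.startswith("wait:")), len(u))
def pvWaitIdx : List String → Nat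
  | [] => 0
  | c :: rest => if PySem.Str.startswith c "wait:" then 0 else pvWaitIdx rest + 1

def replace_relative_motion_sequence_py (op_cmds : List String) (move_op_cmd : String) : List String :=
  match pvAloop move_op_cmd op_cmds [] false with
  | (u, replaced) =>
    if !replaced then PySem.List.insert u ((pvWaitIdx u : Nat) : Int) move_op_cmd else u

-- ===== PORT B =====
def pvKeep (c : String) : Bool :=
  !(PySem.Str.startswith c "move:" || PySem.Str.startswith c "look:" || PySem.Str.startswith c "gesture:")

def replace_relative_motion_sequence_py_alt (op_cmds : List String) (move_op_cmd : String) : List String :=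
  let filtered := op_cmds.filter pvKeep
  let pos : Nat :=
    match op_cmds.findIdx? (fun c => PySem.Str.startswith c "move:") with
    | some i => ((op_cmds.take i).filter pvKeep).length
    | none =>
      match filtered.findIdx? (fun c => PySem.Str.startswith c "wait:") with
      | some j => j
      | none => filtered.length
  PySem.List.insert filtered ((pos : Nat) : Int) move_op_cmd

-- ===== PRECONDITION & SPEC =====
def Spec_replace_relative_motion_sequence_py (op_cmds : List String) (move_op_cmd : String) (out : List String) : Prop := out = replace_relative_motion_sequence_py_alt op_cmds move_op_cmd
instance (op_cmds : List String) (move_op_cmd : String) (out : List String) : Decidable (Spec_replace_relative_motion_sequence_py op_cmds move_op_cmd out) := by unfold Spec_replace_relative_motion_sequence_py; infer_instance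

-- ===== CLAIM (what is proved, stated in full; the proofs are below) =====
def Claim_equal_replace_relative_motion_sequence_py : Prop := ∀ (op_cmds : List String) (move_op_cmd : String), Dom_replace_relative_motion_sequence_py op_cmds move_op_cmd → Spec_replace_relative_motion_sequence_py op_cmds move_op_cmd (replace_relative_motion_sequence_py op_cmds move_op_cmd)

-- ===== LEMMAS AND PROOFS =====

-- the accumulator of A's loop is a pure prefix
theorem pvAloop_acc (m : String) (cmds : List String) (acc : List String) (b : Bool) :
    pvAloop m cmds acc b = (acc ++ (pvAloop m cmds [] b).1, (pvAloop m cmds [] b).2) := by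
  induction cmds generalizing acc b with
  | nil => simp [pvAloop]
  | cons c rest ih =>
    simp only [pvAloop, List.nil_append]
    split_ifs with h1 h2 h3
    · rw [ih (acc ++ [m]) true, ih [m] true]; simp
    · exact ih acc b
    · exact ih acc b
    · rw [ih (acc ++ [c]) b, ih [c] b]; simp

-- once replaced, the rest of the loop is a pure filter
theorem pvAloop_true (m : String) (cmds : List String) :
    pvAloop m cmds [] true = (cmds.filter pvKeep, true) := by
  induction cmds with
  | nil => simp [pvAloop]
  | cons c rest ih =>
    by_cases h1 : PySem.Chars.startswith c.toList ['m','o','v','e',':'] = true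
    · simp [pvAloop, h1, ih, pvKeep]
    · by_cases h2 : PySem.Chars.startswith c.toList ['l','o','o','k',':'] = true
      · simp [pvAloop, h1, h2, ih, pvKeep]
      · by_cases h3 : PySem.Chars.startswith c.toList ['g','e','s','t','u','r','e',':'] = true
        · simp [pvAloop, h1, h2, h3, ih, pvKeep]
        · rw [show pvAloop m (c :: rest) [] true = pvAloop m rest [c] true by
            simp [pvAloop, h1, h2, h3]]
          rw [pvAloop_acc m rest [c] true, ih]
          simp [pvKeep, h1, h2, h3]

-- with no "move:" in cmds, A's loop is a pure filter with the flag still false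
theorem pvAloop_nomove (m : String) (cmds : List String)
    (h : cmds.findIdx? (fun c => PySem.Str.startswith c "move:") = none) :
    pvAloop m cmds [] false = (cmds.filter pvKeep, false) := by
  induction cmds with
  | nil => simp [pvAloop]
  | cons c rest ih =>
    rw [List.findIdx?_cons] at h
    by_cases h1 : PySem.Chars.startswith c.toList ['m','o','v','e',':'] = true
    · simp [h1] at h
    · simp [h1] at h
      rw [show List.findIdx? (fun c => PySem.Str.startswith c "move:") rest = none by
        simpa using h] at *
      by_cases h2 : PySem.Chars.startswith c.toList ['l','o','o','k',':'] = true
      · simp only [show pvAloop m (c :: rest) [] false = pvAloop m rest [] false by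
          simp [pvAloop, h1, h2]]
        rw [ih (by simpa using h)]
        simp [pvKeep, h2]
      · by_cases h3 : PySem.Chars.startswith c.toList ['g','e','s','t','u','r','e',':'] = true
        · simp only [show pvAloop m (c :: rest) [] false = pvAloop m rest [] false by
            simp [pvAloop, h1, h2, h3]]
          rw [ih (by simpa using h)]
          simp [pvKeep, h3]
        · rw [show pvAloop m (c :: rest) [] false = pvAloop m rest [c] false by
            simp [pvAloop, h1, h2, h3]]
          rw [pvAloop_acc m rest [c] false, ih (by simpa using h)]
          simp [pvKeep, h1, h2, h3]

-- with the first "move:" at index i, A's loop filters around m and ends with the flag set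
theorem pvAloop_move (m : String) (cmds : List String) (i : Nat)
    (h : cmds.findIdx? (fun c => PySem.Str.startswith c "move:") = some i) :
    pvAloop m cmds [] false =
      ((cmds.take i).filter pvKeep ++ m :: (cmds.drop (i+1)).filter pvKeep, true) := by
  induction cmds generalizing i with
  | nil => simp at h
  | cons c rest ih =>
    rw [List.findIdx?_cons] at h
    by_cases h1 : PySem.Chars.startswith c.toList ['m','o','v','e',':'] = true
    · simp [h1] at h
      subst h
      rw [show pvAloop m (c :: rest) [] false = pvAloop m rest [m] true by
        simp [pvAloop, h1]]
      rw [pvAloop_acc m rest [m] true, pvAloop_true]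
      simp
    · simp [h1] at h
      obtain ⟨j, hj, rfl⟩ := h
      have hj' : rest.findIdx? (fun c => PySem.Str.startswith c "move:") = some j := by
        simpa using hj
      simp only [List.take_succ_cons, List.drop_succ_cons]
      by_cases h2 : PySem.Chars.startswith c.toList ['l','o','o','k',':'] = true
      · rw [show pvAloop m (c :: rest) [] false = pvAloop m rest [] false by
          simp [pvAloop, h1, h2]]
        rw [ih j hj']
        simp [pvKeep, h2]
      · by_cases h3 : PySem.Chars.startswith c.toList ['g','e','s','t','u','r','e',':'] = true
        · rw [show pvAloop m (c :: rest) [] false = pvAloop m rest [] false by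
            simp [pvAloop, h1, h2, h3]]
          rw [ih j hj']
          simp [pvKeep, h3]
        · rw [show pvAloop m (c :: rest) [] false = pvAloop m rest [c] false by
            simp [pvAloop, h1, h2, h3]]
          rw [pvAloop_acc m rest [c] false, ih j hj']
          simp [pvKeep, h1, h2, h3]

-- filtering splits around the first "move:" (which itself is dropped)
theorem filter_split_at_move (cmds : List String) (i : Nat)
    (h : cmds.findIdx? (fun c => PySem.Str.startswith c "move:") = some i) :
    cmds.filter pvKeep = (cmds.take i).filter pvKeep ++ (cmds.drop (i+1)).filter pvKeep := by
  induction cmds generalizing i with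
  | nil => simp at h
  | cons c rest ih =>
    rw [List.findIdx?_cons] at h
    by_cases h1 : PySem.Chars.startswith c.toList ['m','o','v','e',':'] = true
    · simp [h1] at h
      subst h
      simp [pvKeep, h1]
    · simp [h1] at h
      obtain ⟨j, hj, rfl⟩ := h
      have hj' : rest.findIdx? (fun c => PySem.Str.startswith c "move:") = some j := by
        simpa using hj
      simp only [List.take_succ_cons, List.drop_succ_cons, List.filter_cons]
      rw [ih j hj']
      split <;> simp

-- A's wait-index search equals B's findIdx?-based index
theorem pvWaitIdx_eq (u : List String) :
    (pvWaitIdx u : Nat) =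
      (match u.findIdx? (fun c => PySem.Str.startswith c "wait:") with
       | some j => j
       | none => u.length) := by
  induction u with
  | nil => simp [pvWaitIdx]
  | cons c rest ih =>
    rw [List.findIdx?_cons]
    by_cases h : PySem.Chars.startswith c.toList ['w','a','i','t',':'] = true
    · simp [pvWaitIdx, h]
    · have hw : pvWaitIdx (c :: rest) = pvWaitIdx rest + 1 := by simp [pvWaitIdx, h]
      rw [hw, ih]
      cases hr : rest.findIdx? (fun c => PySem.Str.startswith c "wait:") <;>
        simp [h, List.length_cons]

theorem insert_at_prefix (xs ys : List String) (v : String) :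
    PySem.List.insert (xs ++ ys) ((xs.length : Nat) : Int) v = xs ++ v :: ys := by
  rw [PySem.List.insert_natCast _ _ _ (by simp)]
  simp

-- ===== VERDICT (by name: the statement is the Claim_ definition above) =====
theorem replace_relative_motion_sequence_py_spec : Claim_equal_replace_relative_motion_sequence_py := by
  intro cmds m _
  unfold Spec_replace_relative_motion_sequence_py
  unfold replace_relative_motion_sequence_py replace_relative_motion_sequence_py_alt
  cases hf : cmds.findIdx? (fun c => PySem.Str.startswith c "move:") with
  | some i =>
    rw [pvAloop_move m cmds i hf]
    simp only [Bool.not_true, Bool.false_eq_true, if_false]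
    rw [filter_split_at_move cmds i hf, insert_at_prefix]
  | none =>
    rw [pvAloop_nomove m cmds hf]
    simp only [Bool.not_false, if_true]
    rw [pvWaitIdx_eq]
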